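-- pv_equiv track=rewrite | github.com/helloworld729/reinforcement-learning-an-introduction | chapter05 - 副本/blackjack.py | useable_A
-- ===== SOURCE A (Python) =====
-- def useable_A(lst):
--     total = sum(lst)
--     if 11 not in lst:
--         return False, total
--     elif sum(lst) < 22:
--         return True, total
--     else:
--         info = {}
--         for data in lst:
--             if info.get(data, -1) == -1:
--                 info[data] = 1
--             else:
--                 info[data] += 1
--         while total >= 22 and info[11] > 0:
--             total -= 10
--             info[11] -= 1
--         if total > 21 or info[11] <= 0:
--             return False, total
--         else:
--             return True, total
-- ===== SOURCE B (Python) =====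
-- def useable_A(lst):
--     total = sum(lst)
--     aces = lst.count(11)
--     if aces == 0:
--         return False, total
--     if total < 22:
--         return True, total
--     k = min(aces, (total - 12) // 10)
--     final = total - 10 * k
--     return (aces - k > 0 and final <= 21, final)
-- ===== Notes on version B (the rewrite author's own statement) =====
-- stated objective: simpler
-- what changed: Replaces the counting dict and the subtract-10 while loop with a closed-form count of aces to downgrade: k = min(count(11), (total-12)//10), final = total - 10*k.
import Mathlib
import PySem

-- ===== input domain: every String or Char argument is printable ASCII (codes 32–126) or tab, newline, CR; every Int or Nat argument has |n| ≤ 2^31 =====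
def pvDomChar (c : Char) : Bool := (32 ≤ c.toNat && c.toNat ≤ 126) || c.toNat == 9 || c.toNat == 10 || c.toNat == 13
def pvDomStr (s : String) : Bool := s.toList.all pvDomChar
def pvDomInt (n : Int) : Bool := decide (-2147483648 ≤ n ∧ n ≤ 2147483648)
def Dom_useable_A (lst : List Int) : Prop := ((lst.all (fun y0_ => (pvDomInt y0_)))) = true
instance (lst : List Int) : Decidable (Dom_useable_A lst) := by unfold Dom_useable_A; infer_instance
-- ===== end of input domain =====

-- B replaces A's counting dict and subtract-10 while loop by a closed-form count of
-- aces to downgrade (simpler; same O(n) cost).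

-- ===== PORT A =====
-- the 'while total >= 22 and info[11] > 0: total -= 10; info[11] -= 1' loop,
-- carried on (total, info[11]) since the dict's other entries are never read again
def useable_A_loop (total : Int) (c : Int) : Int × Int :=
  if 22 ≤ total ∧ 0 < c then useable_A_loop (total - 10) (c - 1) else (total, c)
termination_by c.toNat
decreasing_by omega

def useable_A (lst : List Int) : Bool × Int :=
  let total := lst.sum
  if lst.contains 11 = false then (false, total)
  else if lst.sum < 22 then (true, total)
  else
    -- info = {}; for data in lst: if info.get(data, -1) == -1: info[data] = 1 else: info[data] += 1
    let info : PySem.Dict Int Int :=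
      lst.foldl (fun d x => if d.getD x (-1) == -1 then d.insert x 1
                            else d.insert x (d.getD x 0 + 1)) PySem.Dict.empty
    -- info[11]: key present in this branch (11 ∈ lst), so getD is exact here
    let p := useable_A_loop total (info.getD 11 0)
    if 21 < p.1 ∨ p.2 ≤ 0 then (false, p.1) else (true, p.1)

-- ===== PORT B =====
def useable_A_alt (lst : List Int) : Bool × Int :=
  let total := lst.sum
  let aces : Int := lst.count 11
  if aces = 0 then (false, total)
  else if total < 22 then (true, total)
  else
    let k := min aces (PySem.Int.floordiv (total - 12) 10)
    let final := total - 10 * k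
    (decide (0 < aces - k) && decide (final ≤ 21), final)

-- ===== PRECONDITION & SPEC =====
def Spec_useable_A (lst : List Int) (out : Bool × Int) : Prop := out = useable_A_alt lst
instance (lst : List Int) (out : Bool × Int) : Decidable (Spec_useable_A lst out) := by unfold Spec_useable_A; infer_instance

-- ===== CLAIM (what is proved, stated in full; the proofs are below) =====
def Claim_equal_useable_A : Prop := ∀ (lst : List Int), Dom_useable_A lst → Spec_useable_A lst (useable_A lst)

-- ===== LEMMAS AND PROOFS =====

-- A's dict loop is the plain counter loop: its values are always ≥ 1, so the
-- get(data, -1) == -1 test is exactly "key absent".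
theorem useable_A_fold_eq (l : List Int) (d : PySem.Dict Int Int)
    (hd : ∀ k v, d.get? k = some v → 1 ≤ v) :
    l.foldl (fun d x => if d.getD x (-1) == -1 then d.insert x 1
                        else d.insert x (d.getD x 0 + 1)) d
      = l.foldl (fun d x => d.insert x (d.getD x 0 + 1)) d := by
  induction l generalizing d with
  | nil => rfl
  | cons x l ih =>
    simp only [List.foldl_cons]
    have hnn : 0 ≤ d.getD x 0 := by
      cases hg : d.get? x with
      | none => simp [PySem.Dict.getD_eq_get?_getD, hg]
      | some w => have := hd x w hg; rw [PySem.Dict.getD_of_get?_eq_some d 0 hg]; omega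
    have hstep : (if d.getD x (-1) == -1 then d.insert x 1
                  else d.insert x (d.getD x 0 + 1)) = d.insert x (d.getD x 0 + 1) := by
      by_cases h : d.getD x (-1) = -1
      · have hget : d.get? x = none := by
          cases hg : d.get? x with
          | none => rfl
          | some v =>
            have h1 := hd x v hg
            have h2 : d.getD x (-1) = v := PySem.Dict.getD_of_get?_eq_some d (-1) hg
            omega
        have h0 : d.getD x 0 = 0 := by simp [PySem.Dict.getD_eq_get?_getD, hget]
        simp [h, h0]
      · simp [h]
    rw [hstep]
    exact ih _ (by
      intro k v hk
      rw [PySem.Dict.get?_insert] at hk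
      split at hk
      · have hv : d.getD x 0 + 1 = v := by injection hk
        omega
      · exact hd k v hk)

theorem useable_A_count (lst : List Int) :
    (lst.foldl (fun d x => if d.getD x (-1) == -1 then d.insert x 1
                           else d.insert x (d.getD x 0 + 1)) PySem.Dict.empty).getD 11 0
      = (lst.count 11 : Int) := by
  rw [useable_A_fold_eq lst PySem.Dict.empty (by intro k v h; simp [PySem.Dict.get?_empty] at h)]
  simp [PySem.Dict.getD_foldl_insert_add_one, PySem.Dict.getD_empty]

-- closed form of the while loop
theorem useable_A_loop_eq (n : Nat) : ∀ (total c : Int), c.toNat = n → 22 ≤ total → 1 ≤ c →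
    useable_A_loop total c
      = (total - 10 * min c (PySem.Int.floordiv (total - 12) 10),
         c - min c (PySem.Int.floordiv (total - 12) 10)) := by
  induction n using Nat.strong_induction_on with
  | _ n ih =>
    intro total c hn htot hc
    have hq := (PySem.Int.floordiv_eq_iff_of_pos (a := total - 12) (b := 10)
      (q := PySem.Int.floordiv (total - 12) 10) (by omega)).mp rfl
    rw [useable_A_loop, if_pos ⟨htot, by omega⟩]
    by_cases h2 : 22 ≤ total - 10 ∧ 1 ≤ c - 1
    · have hq' := (PySem.Int.floordiv_eq_iff_of_pos (a := total - 10 - 12) (b := 10)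
        (q := PySem.Int.floordiv (total - 10 - 12) 10) (by omega)).mp rfl
      rw [ih (c - 1).toNat (by omega) (total - 10) (c - 1) rfl h2.1 h2.2]
      have hsh : PySem.Int.floordiv (total - 10 - 12) 10
           = PySem.Int.floordiv (total - 12) 10 - 1 := by omega
      rw [hsh, Prod.mk.injEq]
      omega
    · rw [useable_A_loop, if_neg (by omega), Prod.mk.injEq]
      omega

-- the tail of A (flag from the loop result) as B computes it
theorem useable_A_tail (a b : Int) :
    (if 21 < b ∨ a ≤ 0 then ((false : Bool), b) else (true, b))
      = ((decide (0 < a) && decide (b ≤ 21)), b) := by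
  by_cases h1 : 0 < a <;> by_cases h2 : b ≤ 21 <;> simp [h1, h2]

-- ===== VERDICT (by name: the statement is the Claim_ definition above) =====
theorem useable_A_spec : Claim_equal_useable_A := by
  intro lst _
  simp only [Spec_useable_A, useable_A, useable_A_alt]
  by_cases hm : lst.contains 11 = false
  · have hc0 : (lst.count 11 : Int) = 0 := by
      simp only [List.contains_eq_mem, decide_eq_false_iff_not] at hm
      simp [List.count_eq_zero_of_not_mem hm]
    rw [if_pos hm, if_pos hc0]
  · have hmem : 11 ∈ lst := by
      by_contra h
      exact hm (by simp [List.contains_eq_mem, h])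
    have hcpos : 1 ≤ (lst.count 11 : Int) := by
      have := List.count_pos_iff.mpr hmem
      omega
    rw [if_neg hm, if_neg (show ¬((lst.count 11 : Int) = 0) by omega)]
    by_cases hs : lst.sum < 22
    · rw [if_pos hs, if_pos hs]
    · rw [if_neg hs, if_neg hs, useable_A_count lst,
        useable_A_loop_eq ((lst.count 11 : Int)).toNat lst.sum ((lst.count 11 : Int)) rfl
          (by omega) hcpos]
      exact useable_A_tail _ _
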